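-- pv_equiv track=rewrite | github.com/collective-context/ccc | lib/ccc_command_parser.py | validate_command_chain
-- ===== SOURCE A (Python) =====
-- def validate_command_chain(expanded_commands):
--     """Validate that the expanded command chain makes sense"""
--     if len(expanded_commands) == 0:
--         return False
--
--     # Define valid command patterns
--     valid_patterns = [
--         ['help'],
--         ['version'],
--         ['status'],
--         ['config', 'show'],
--         ['config', 'set'],
--         ['session'],
--         ['context'],
--         ['git', 'push', 'homepage'],
--         ['git', 'push', 'ccc'],
--         ['git', 'push', 'ccc', 'test'],
--         ['git', 'push', 'ccc', 'tests'],
--         ['git', 'push', 'ccc', 'full'],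
--         ['exec', 'upload', 'ppa'],
--         ['exec', 'fix', 'gpg'],
--     ]
--
--     # Check if command matches any valid pattern
--     for pattern in valid_patterns:
--         if len(expanded_commands) >= len(pattern):
--             if expanded_commands[:len(pattern)] == pattern:
--                 return True
--
--     return False
-- ===== SOURCE B (Python) =====
-- def validate_command_chain(expanded_commands):
--     """Validate that the expanded command chain makes sense"""
--     if not expanded_commands:
--         return False
--     head = expanded_commands[0]
--     if head in ('help', 'version', 'status', 'session', 'context'):
--         return True
--     if head == 'config':
--         return len(expanded_commands) >= 2 and expanded_commands[1] in ('show', 'set')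
--     if head == 'git':
--         return (len(expanded_commands) >= 3 and expanded_commands[1] == 'push'
--                 and expanded_commands[2] in ('homepage', 'ccc'))
--     if head == 'exec':
--         return (len(expanded_commands) >= 3 and
--                 (expanded_commands[1], expanded_commands[2]) in (('upload', 'ppa'), ('fix', 'gpg')))
--     return False
-- ===== Notes on version B (the rewrite author's own statement) =====
-- stated objective: simpler
-- what changed: Replaced A's scan over a flat list of 14 patterns (comparing a prefix slice of the input against each pattern) with a decision tree that dispatches once on the first token and then checks at most two more tokens, dropping the three redundant length-4 git patterns already covered by their length-3 prefix pattern.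
import Mathlib
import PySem

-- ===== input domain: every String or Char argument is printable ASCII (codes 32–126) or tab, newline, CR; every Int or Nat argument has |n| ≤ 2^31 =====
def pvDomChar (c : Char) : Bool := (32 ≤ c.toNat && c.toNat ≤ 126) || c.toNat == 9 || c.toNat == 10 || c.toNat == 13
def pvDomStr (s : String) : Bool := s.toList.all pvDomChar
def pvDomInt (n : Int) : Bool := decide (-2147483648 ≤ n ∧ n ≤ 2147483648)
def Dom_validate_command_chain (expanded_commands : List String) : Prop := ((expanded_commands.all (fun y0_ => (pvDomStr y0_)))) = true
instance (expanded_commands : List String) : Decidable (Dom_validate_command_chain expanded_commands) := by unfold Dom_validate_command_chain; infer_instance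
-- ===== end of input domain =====

-- B replaces A's scan over a flat list of 14 patterns (with a prefix slice per pattern)
-- by a direct decision tree dispatching on the first token; objective: simpler.

-- ===== PORT A =====
def patternsA : List (List String) :=
  [["help"], ["version"], ["status"], ["config", "show"], ["config", "set"],
   ["session"], ["context"],
   ["git", "push", "homepage"], ["git", "push", "ccc"],
   ["git", "push", "ccc", "test"], ["git", "push", "ccc", "tests"], ["git", "push", "ccc", "full"],
   ["exec", "upload", "ppa"], ["exec", "fix", "gpg"]]

-- the 'for pattern in valid_patterns' loop with its early 'return True'
def loopA (xs : List String) : List (List String) → Bool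
  | [] => false
  | p :: ps =>
    if xs.length ≥ p.length then
      if PySem.List.slice xs none (some (p.length : Int)) = p then true
      else loopA xs ps
    else loopA xs ps

def validate_command_chain (expanded_commands : List String) : Bool :=
  if expanded_commands.length = 0 then false
  else loopA expanded_commands patternsA

-- ===== PORT B =====
def validate_command_chain_alt (expanded_commands : List String) : Bool :=
  match expanded_commands with
  | [] => false
  | head :: rest =>
    if head = "help" ∨ head = "version" ∨ head = "status" ∨ head = "session" ∨ head = "context" then
      true
    else if head = "config" then
      -- len >= 2 and expanded_commands[1] in ('show','set')
      match rest with
      | c1 :: _ => c1 = "show" ∨ c1 = "set"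
      | [] => false
    else if head = "git" then
      -- len >= 3 and expanded_commands[1] == 'push' and expanded_commands[2] in ('homepage','ccc')
      match rest with
      | c1 :: c2 :: _ => c1 = "push" ∧ (c2 = "homepage" ∨ c2 = "ccc")
      | _ => false
    else if head = "exec" then
      -- len >= 3 and (expanded_commands[1], expanded_commands[2]) in (('upload','ppa'),('fix','gpg'))
      match rest with
      | c1 :: c2 :: _ => (c1 = "upload" ∧ c2 = "ppa") ∨ (c1 = "fix" ∧ c2 = "gpg")
      | _ => false
    else false

-- ===== PRECONDITION & SPEC =====
def Spec_validate_command_chain (expanded_commands : List String) (out : Bool) : Prop := out = validate_command_chain_alt expanded_commands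
instance (expanded_commands : List String) (out : Bool) : Decidable (Spec_validate_command_chain expanded_commands out) := by unfold Spec_validate_command_chain; infer_instance

-- ===== CLAIM (what is proved, stated in full; the proofs are below) =====
def Claim_equal_validate_command_chain : Prop := ∀ (expanded_commands : List String), Dom_validate_command_chain expanded_commands → Spec_validate_command_chain expanded_commands (validate_command_chain expanded_commands)

-- ===== LEMMAS AND PROOFS =====

-- ===== VERDICT (by name: the statement is the Claim_ definition above) =====
theorem validate_command_chain_spec : Claim_equal_validate_command_chain := by
  intro xs _
  unfold Spec_validate_command_chain
  have sl : ∀ (ys : List String) (b : Int), 0 ≤ b →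
      PySem.List.slice ys none (some b) = ys.take b.toNat :=
    fun ys b h => PySem.List.slice_to (b := b) ys h
  rcases xs with _ | ⟨a, _ | ⟨b, _ | ⟨c, _ | ⟨d, rest⟩⟩⟩⟩ <;>
    simp [validate_command_chain, validate_command_chain_alt, loopA, patternsA,
      sl _ 1 (by norm_num), sl _ 2 (by norm_num), sl _ 3 (by norm_num), sl _ 4 (by norm_num)] <;>
    try (by_cases h1 : a = "config" <;> by_cases h2 : a = "git" <;> by_cases h3 : a = "exec" <;>
      first
        | (simp_all [Bool.and_or_distrib_left] <;> tauto)
        | (by_cases h4 : b = "push" <;> by_cases h5 : c = "ccc" <;>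
            simp_all [Bool.and_or_distrib_left] <;> tauto))
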